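-- pv_equiv track=rewrite | github.com/manulera/genestorian_data_refinement | genestorian_module/genestorian_module/third_version_pipeline.py | find_common_pattern
-- ===== SOURCE A (Python) =====
-- def find_common_pattern(alleles_list):
--     occurences_dict = {}
--     for allele_dict in alleles_list:
--         pattern = allele_dict['pattern']
--         allele_name = allele_dict['name']
--         if pattern in occurences_dict:
--             occurences_dict[pattern].append(allele_name)
--         else:
--             occurences_dict[pattern] = [allele_name]
--     return occurences_dict
-- ===== SOURCE B (Python) =====
-- def find_common_pattern(alleles_list):
--     keys = list(dict.fromkeys(d['pattern'] for d in alleles_list))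
--     return {p: [d['name'] for d in alleles_list if d['pattern'] == p] for p in keys}
-- ===== Notes on version B (the rewrite author's own statement) =====
-- stated objective: alternative
-- what changed: Replaces the single-pass hash-and-append grouping with a two-phase decomposition: first collect the ordered distinct patterns via dict.fromkeys, then a dict comprehension does one filtering scan per pattern; trades O(n) for O(n*k) nested scans.
import Mathlib
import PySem

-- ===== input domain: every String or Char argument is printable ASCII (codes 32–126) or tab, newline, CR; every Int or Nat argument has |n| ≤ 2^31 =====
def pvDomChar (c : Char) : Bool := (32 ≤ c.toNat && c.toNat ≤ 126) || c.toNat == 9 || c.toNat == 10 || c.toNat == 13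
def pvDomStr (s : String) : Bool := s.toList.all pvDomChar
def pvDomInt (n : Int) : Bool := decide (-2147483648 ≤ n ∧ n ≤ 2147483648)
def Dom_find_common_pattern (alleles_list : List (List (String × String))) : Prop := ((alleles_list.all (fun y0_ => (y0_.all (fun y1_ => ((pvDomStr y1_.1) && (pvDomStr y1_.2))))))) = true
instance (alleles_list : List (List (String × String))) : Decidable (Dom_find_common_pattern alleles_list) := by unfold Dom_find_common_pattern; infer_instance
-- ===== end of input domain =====

-- B replaces A's single-pass hash-and-append grouping by 'collect the ordered distinct
-- patterns first, then one filtering scan per pattern' (alternative decomposition, not faster).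

-- ===== PORT A =====
-- one iteration of A's for-loop (the two dict lookups raise KeyError when missing; Pre_ excludes that)
def fcpStep (occurences_dict : PySem.Dict String (List String)) (allele_dict : List (String × String)) : PySem.Dict String (List String) :=
  match (PySem.Dict.mk allele_dict).get? "pattern", (PySem.Dict.mk allele_dict).get? "name" with
  | some pattern, some allele_name =>
      if occurences_dict.contains pattern then
        occurences_dict.insert pattern (occurences_dict.getD pattern [] ++ [allele_name])
      else
        occurences_dict.insert pattern [allele_name]
  | _, _ => occurences_dict

def find_common_pattern (alleles_list : List (List (String × String))) : List (String × List String) :=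
  (alleles_list.foldl fcpStep PySem.Dict.empty).items

-- ===== PORT B =====
def find_common_pattern_alt (alleles_list : List (List (String × String))) : List (String × List String) :=
  let keys := PySem.Set.ofList (alleles_list.filterMap (fun d => (PySem.Dict.mk d).get? "pattern"))
  keys.map (fun p => (p, alleles_list.filterMap (fun d =>
    if (PySem.Dict.mk d).get? "pattern" = some p then (PySem.Dict.mk d).get? "name" else none)))

-- ===== PRECONDITION & SPEC =====
-- Pre_ excludes exactly the inputs where some allele dict lacks a 'pattern' or 'name' key,
-- on which the Python A raises KeyError.
def Pre_find_common_pattern (alleles_list : List (List (String × String))) : Prop :=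
  (alleles_list.all (fun d => (PySem.Dict.mk d).contains "pattern" && (PySem.Dict.mk d).contains "name")) = true
instance (alleles_list : List (List (String × String))) : Decidable (Pre_find_common_pattern alleles_list) := by unfold Pre_find_common_pattern; infer_instance

def pvWitness_find_common_pattern : (List (List (String × String))) :=
  [[("pattern", "G@@"), ("name", "ase1-1")], [("pattern", "G@@"), ("name", "ase1-2")], [("name", "cdc2"), ("pattern", "other")]]

def Spec_find_common_pattern (alleles_list : List (List (String × String))) (out : List (String × List String)) : Prop := out = find_common_pattern_alt alleles_list
instance (alleles_list : List (List (String × String))) (out : List (String × List String)) : Decidable (Spec_find_common_pattern alleles_list out) := by unfold Spec_find_common_pattern; infer_instance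

-- ===== CLAIM (what is proved, stated in full; the proofs are below) =====
def Claim_equal_find_common_pattern : Prop := ∀ (alleles_list : List (List (String × String))), Dom_find_common_pattern alleles_list → Pre_find_common_pattern alleles_list → Spec_find_common_pattern alleles_list (find_common_pattern alleles_list)

-- ===== LEMMAS AND PROOFS =====

-- total pair extraction used only by the proof (under Pre_ it returns the two looked-up values)
def fcpPair (d : List (String × String)) : String × String :=
  (((PySem.Dict.mk d).get? "pattern").getD "", ((PySem.Dict.mk d).get? "name").getD "")

theorem fcpStep_eq_modify (acc : PySem.Dict String (List String)) (d : List (String × String))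
    (hp : (PySem.Dict.mk d).contains "pattern" = true) (hn : (PySem.Dict.mk d).contains "name" = true) :
    fcpStep acc d = acc.modify (fcpPair d).1 [] (· ++ [(fcpPair d).2]) := by
  rw [PySem.Dict.contains_eq_isSome_get?] at hp hn
  obtain ⟨p, hp⟩ := Option.isSome_iff_exists.mp hp
  obtain ⟨n, hn⟩ := Option.isSome_iff_exists.mp hn
  unfold fcpStep fcpPair
  rw [hp, hn]
  simp only [Option.getD_some]
  by_cases hc : acc.contains p = true
  · simp [hc, PySem.Dict.modify]
  · simp only [Bool.not_eq_true] at hc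
    simp only [hc, Bool.false_eq_true, if_false, PySem.Dict.modify,
      PySem.Dict.getD_of_not_contains acc [] hc, List.nil_append]

theorem foldA_eq (alleles_list : List (List (String × String)))
    (hpre : Pre_find_common_pattern alleles_list) :
    alleles_list.foldl fcpStep PySem.Dict.empty =
      (alleles_list.map fcpPair).foldl (fun acc pr => acc.modify pr.1 [] (· ++ [pr.2])) PySem.Dict.empty := by
  rw [List.foldl_map]
  apply PySem.List.foldl_congr_mem' (h := ?_)
  intro d hd acc
  have := List.all_eq_true.mp hpre d hd
  simp only [Bool.and_eq_true] at this
  exact fcpStep_eq_modify acc d this.1 this.2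

-- B's per-pattern comprehension over alleles_list, written over the pair list
theorem filterB_eq (alleles_list : List (List (String × String)))
    (hpre : Pre_find_common_pattern alleles_list) (p : String) :
    alleles_list.filterMap (fun d =>
        if (PySem.Dict.mk d).get? "pattern" = some p then (PySem.Dict.mk d).get? "name" else none)
      = ((alleles_list.map fcpPair).filter (fun pr => pr.1 == p)).map (·.2) := by
  induction alleles_list with
  | nil => rfl
  | cons d rest ih =>
    have hall := List.all_eq_true.mp hpre d (List.mem_cons_self ..)
    simp only [Bool.and_eq_true, PySem.Dict.contains_eq_isSome_get?] at hall
    obtain ⟨pd, hp⟩ := Option.isSome_iff_exists.mp hall.1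
    obtain ⟨nd, hn⟩ := Option.isSome_iff_exists.mp hall.2
    have hrest : Pre_find_common_pattern rest := by
      apply List.all_eq_true.mpr; intro x hx
      exact List.all_eq_true.mp hpre x (List.mem_cons_of_mem _ hx)
    simp only [List.filterMap_cons, List.map_cons, List.filter_cons, fcpPair, hp, hn,
      Option.getD_some]
    by_cases hc : pd = p
    · simp [hc, ih hrest]
    · simp only [beq_iff_eq, hc, Option.some.injEq, if_false]
      exact ih hrest

theorem keysB_eq (alleles_list : List (List (String × String)))
    (hpre : Pre_find_common_pattern alleles_list) :
    alleles_list.filterMap (fun d => (PySem.Dict.mk d).get? "pattern")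
      = (alleles_list.map fcpPair).map (·.1) := by
  induction alleles_list with
  | nil => rfl
  | cons d rest ih =>
    have hall := List.all_eq_true.mp hpre d (List.mem_cons_self ..)
    simp only [Bool.and_eq_true, PySem.Dict.contains_eq_isSome_get?] at hall
    obtain ⟨pd, hp⟩ := Option.isSome_iff_exists.mp hall.1
    have hrest : Pre_find_common_pattern rest := by
      apply List.all_eq_true.mpr; intro x hx
      exact List.all_eq_true.mp hpre x (List.mem_cons_of_mem _ hx)
    simp only [List.filterMap_cons, List.map_cons, fcpPair, hp, Option.getD_some]
    exact congrArg _ (ih hrest)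

-- ===== VERDICT (by name: the statement is the Claim_ definition above) =====
theorem find_common_pattern_spec : Claim_equal_find_common_pattern := by
  intro alleles_list _ hpre
  unfold Spec_find_common_pattern find_common_pattern find_common_pattern_alt
  set l := alleles_list.map fcpPair with hl
  rw [foldA_eq alleles_list hpre, keysB_eq alleles_list hpre]
  have hnd : ((l.foldl (fun acc pr => acc.modify pr.1 [] (· ++ [pr.2])) PySem.Dict.empty)).keys.Nodup := by
    apply PySem.Dict.nodup_keys_foldl_modify_key
    simp [PySem.Dict.keys_empty]
  rw [PySem.Dict.items_eq_map_keys _ hnd []]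
  rw [PySem.Dict.keys_foldl_modify_key]
  simp only [PySem.Dict.keys_empty, PySem.Set.update_nil_left]
  apply List.map_congr_left
  intro p _
  rw [PySem.Dict.getD_foldl_modify_append, PySem.Dict.getD_empty, filterB_eq alleles_list hpre p]
  rfl
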